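-- pv_equiv track=rewrite | github.com/ad-astra-per-ardua/Solving-Algorithm | CodeForce/Codeforces Round 871 (Div. 4) Prob_D.py | solve
-- ===== SOURCE A (Python) =====
-- def solve(n, m):
--     if n == m:
--         return True
--     if n < m:
--         return False
--     if n % 3 == 0:
--         return solve(n // 3, m) or solve((2 * n) // 3, m)
--     return False
-- ===== SOURCE B (Python) =====
-- def solve(n, m):
--     # Level-by-level BFS over the set of reachable values; the set deduplicates
--     # the overlapping subproblems n*2^a/3^b, so each level has O(log n) values.
--     frontier = {n}
--     while frontier:
--         if m in frontier:
--             return True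
--         nxt = set()
--         for v in frontier:
--             if v > m and v % 3 == 0:
--                 nxt.add(v // 3)
--                 nxt.add(2 * v // 3)
--         frontier = nxt
--     return False
-- ===== Notes on version B (the rewrite author's own statement) =====
-- stated objective: faster
-- what changed: Replaced A's unmemoized binary recursion over the /3 and *2/3 split tree by a level-by-level BFS whose frontier set deduplicates the overlapping subproblems n*2^a/3^b, so each level holds O(log n) values instead of exponentially many call paths.
-- outside the precondition, e.g. on solve(0, -1): A raises RecursionError, B does not finish within the time limit
import Mathlib
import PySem

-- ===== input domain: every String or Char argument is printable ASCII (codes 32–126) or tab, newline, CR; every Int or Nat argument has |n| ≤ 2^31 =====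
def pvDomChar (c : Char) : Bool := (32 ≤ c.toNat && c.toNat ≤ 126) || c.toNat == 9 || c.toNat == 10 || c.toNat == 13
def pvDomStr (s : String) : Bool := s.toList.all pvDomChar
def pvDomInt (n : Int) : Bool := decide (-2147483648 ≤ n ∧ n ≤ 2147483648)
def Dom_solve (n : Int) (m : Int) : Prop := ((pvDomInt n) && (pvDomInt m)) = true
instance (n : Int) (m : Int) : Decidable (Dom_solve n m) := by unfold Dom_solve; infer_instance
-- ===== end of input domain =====

-- B replaces A's exponential unmemoized recursion over the /3 and *2/3 split tree by a
-- level-by-level BFS whose set deduplicates the overlapping subproblems (objective: faster).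
-- Both Python programs fail to terminate exactly on n = 0 ∧ m < 0 (A: RecursionError); the
-- ports use a fuel of 100, which covers every terminating run on Dom, and Pre_ excludes the
-- diverging inputs.

-- ===== PORT A =====
-- fueled transliteration of A's recursion; fuel 100 exceeds the recursion depth on Dom
def solveFuel : Nat → Int → Int → Bool
  | 0, _, _ => false
  | f+1, n, m =>
    if n = m then true
    else if n < m then false
    else if PySem.Int.mod n 3 = 0 then
      solveFuel f (PySem.Int.floordiv n 3) m || solveFuel f (PySem.Int.floordiv (2*n) 3) m
    else false

def solve (n : Int) (m : Int) : Bool := solveFuel 100 n m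

-- ===== PORT B =====
-- one BFS level: nxt = {v//3, 2*v//3 : v in frontier, v > m and v % 3 == 0}
def nextFrontier (m : Int) (frontier : PySem.Set Int) : PySem.Set Int :=
  frontier.foldl (fun acc v =>
    if v > m ∧ PySem.Int.mod v 3 = 0 then
      PySem.Set.add (PySem.Set.add acc (PySem.Int.floordiv v 3)) (PySem.Int.floordiv (2*v) 3)
    else acc) PySem.Set.empty

-- the while loop, fueled like A's recursion (100 levels suffice on Dom)
def bfsFuel (m : Int) : Nat → PySem.Set Int → Bool
  | 0, _ => false
  | f+1, frontier =>
    if frontier = [] then false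
    else if frontier.contains m then true
    else bfsFuel m f (nextFrontier m frontier)

def solve_alt (n : Int) (m : Int) : Bool := bfsFuel m 100 (PySem.Set.ofList [n])

-- ===== PRECONDITION & SPEC =====
-- Pre_ excludes exactly n = 0 with m < 0, where Python A raises RecursionError (and B loops forever).
def Pre_solve (n : Int) (m : Int) : Prop := ¬ (n = 0 ∧ m < 0)
instance (n : Int) (m : Int) : Decidable (Pre_solve n m) := by unfold Pre_solve; infer_instance
def pvWitness_solve : Int × Int := (9, 2)

def Spec_solve (n : Int) (m : Int) (out : Bool) : Prop := out = solve_alt n m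
instance (n : Int) (m : Int) (out : Bool) : Decidable (Spec_solve n m out) := by unfold Spec_solve; infer_instance

-- ===== CLAIM (what is proved, stated in full; the proofs are below) =====
def Claim_equal_solve : Prop := ∀ (n : Int) (m : Int), Dom_solve n m → Pre_solve n m → Spec_solve n m (solve n m)

-- ===== LEMMAS AND PROOFS =====

-- membership in one BFS level (foldl form, generalized accumulator)
theorem mem_nextFrontier_foldl (m : Int) (l : List Int) (acc : PySem.Set Int) (w : Int) :
    (w ∈ l.foldl (fun acc v =>
      if v > m ∧ PySem.Int.mod v 3 = 0 then
        PySem.Set.add (PySem.Set.add acc (PySem.Int.floordiv v 3)) (PySem.Int.floordiv (2*v) 3)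
      else acc) acc) ↔
      w ∈ acc ∨ ∃ v ∈ l, (v > m ∧ PySem.Int.mod v 3 = 0) ∧
        (w = PySem.Int.floordiv v 3 ∨ w = PySem.Int.floordiv (2*v) 3) := by
  induction l generalizing acc with
  | nil => simp
  | cons v t ih =>
    simp only [List.foldl_cons]
    by_cases h : v > m ∧ PySem.Int.mod v 3 = 0
    · rw [if_pos h, ih]
      simp only [PySem.Set.mem_add, List.mem_cons]
      constructor
      · rintro (((hw | rfl) | rfl) | ⟨u, hu, hc, hw⟩)
        · exact Or.inl hw
        · exact Or.inr ⟨v, Or.inl rfl, h, Or.inl rfl⟩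
        · exact Or.inr ⟨v, Or.inl rfl, h, Or.inr rfl⟩
        · exact Or.inr ⟨u, Or.inr hu, hc, hw⟩
      · rintro (hw | ⟨u, (rfl | hu), hc, (rfl | rfl)⟩)
        · exact Or.inl (Or.inl (Or.inl hw))
        · exact Or.inl (Or.inl (Or.inr rfl))
        · exact Or.inl (Or.inr rfl)
        · exact Or.inr ⟨u, hu, hc, Or.inl rfl⟩
        · exact Or.inr ⟨u, hu, hc, Or.inr rfl⟩
    · rw [if_neg h, ih]
      simp only [List.mem_cons]
      constructor
      · rintro (hw | ⟨u, hu, hc, hw⟩)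
        · exact Or.inl hw
        · exact Or.inr ⟨u, Or.inr hu, hc, hw⟩
      · rintro (hw | ⟨u, (rfl | hu), hc, hw⟩)
        · exact Or.inl hw
        · exact absurd hc h
        · exact Or.inr ⟨u, hu, hc, hw⟩

theorem mem_nextFrontier (m : Int) (S : PySem.Set Int) (w : Int) :
    w ∈ nextFrontier m S ↔
      ∃ v ∈ S, (v > m ∧ PySem.Int.mod v 3 = 0) ∧
        (w = PySem.Int.floordiv v 3 ∨ w = PySem.Int.floordiv (2*v) 3) := by
  unfold nextFrontier
  rw [mem_nextFrontier_foldl]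
  simp [PySem.Set.empty]

-- A's step, on a value known to differ from m
theorem solveFuel_succ_of_ne (f : Nat) (v m : Int) (h : v ≠ m) :
    solveFuel (f+1) v m =
      if v > m ∧ PySem.Int.mod v 3 = 0 then
        (solveFuel f (PySem.Int.floordiv v 3) m || solveFuel f (PySem.Int.floordiv (2*v) 3) m)
      else false := by
  simp only [solveFuel, if_neg h]
  by_cases hlt : v < m
  · rw [if_pos hlt, if_neg (by omega : ¬ (v > m ∧ PySem.Int.mod v 3 = 0))]
  · rw [if_neg hlt]
    have hgt : v > m := by omega
    by_cases hmod : PySem.Int.mod v 3 = 0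
    · rw [if_pos hmod, if_pos ⟨hgt, hmod⟩]
    · rw [if_neg hmod, if_neg (fun hc => hmod hc.2)]

-- the BFS at fuel f answers "some frontier value succeeds in A's fueled recursion at fuel f"
theorem bfsFuel_eq_any (m : Int) (f : Nat) (S : PySem.Set Int) :
    bfsFuel m f S = S.any (fun v => solveFuel f v m) := by
  induction f generalizing S with
  | zero => simp [bfsFuel, solveFuel]
  | succ f ih =>
    simp only [bfsFuel]
    by_cases hS : S = []
    · subst hS; simp
    · rw [if_neg hS]
      by_cases hm : S.contains m
      · rw [if_pos hm]
        symm
        rw [List.any_eq_true]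
        exact ⟨m, List.contains_iff_mem.mp hm, by simp [solveFuel]⟩
      · rw [if_neg hm, ih]
        have hnm : m ∉ S := fun hmem => hm (List.contains_iff_mem.mpr hmem)
        rw [Bool.eq_iff_iff]
        simp only [List.any_eq_true]
        constructor
        · rintro ⟨w, hw, hsw⟩
          obtain ⟨v, hv, hc, hweq⟩ := (mem_nextFrontier m S w).mp hw
          refine ⟨v, hv, ?_⟩
          rw [solveFuel_succ_of_ne f v m (fun he => hnm (he ▸ hv)), if_pos hc]
          rcases hweq with rfl | rfl
          · exact Bool.or_eq_true_iff.mpr (Or.inl hsw)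
          · exact Bool.or_eq_true_iff.mpr (Or.inr hsw)
        · rintro ⟨v, hv, hsv⟩
          rw [solveFuel_succ_of_ne f v m (fun he => hnm (he ▸ hv))] at hsv
          by_cases hc : v > m ∧ PySem.Int.mod v 3 = 0
          · rw [if_pos hc] at hsv
            rcases Bool.or_eq_true_iff.mp hsv with h1 | h1
            · exact ⟨_, (mem_nextFrontier m S _).mpr ⟨v, hv, hc, Or.inl rfl⟩, h1⟩
            · exact ⟨_, (mem_nextFrontier m S _).mpr ⟨v, hv, hc, Or.inr rfl⟩, h1⟩
          · rw [if_neg hc] at hsv; exact absurd hsv (by simp)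


-- ===== VERDICT (by name: the statement is the Claim_ definition above) =====
theorem solve_spec : Claim_equal_solve := by
  intro n m _ _
  unfold Spec_solve solve solve_alt
  rw [bfsFuel_eq_any]
  rw [Bool.eq_iff_iff]
  simp only [List.any_eq_true]
  constructor
  · intro h
    exact ⟨n, (PySem.Set.mem_ofList [n] n).mpr (by simp), h⟩
  · rintro ⟨v, hv, hsv⟩
    have : v = n := by simpa using (PySem.Set.mem_ofList [n] v).mp hv
    exact this ▸ hsv
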